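-- pv_equiv track=rewrite | github.com/soumya20134/CSE508_Winter2024_A1_2020134 | Q3_b.py | process_ordered_phrase_query
-- ===== SOURCE A (Python) =====
-- def process_ordered_phrase_query(tokens, positional_index):
--
--     result = set()
--
--     if tokens[0] in positional_index:
--         result = set(positional_index[tokens[0]].keys())
--
--     for i in range(1,len(tokens)):
--         prev_term = tokens[i-1]
--         curr_term = tokens[i]
--
--         if(prev_term not in positional_index or curr_term not in positional_index):
--             return set()
--
--         doc_prev = set(positional_index[prev_term].keys())
--         doc_curr = set(positional_index[curr_term].keys())
--
--         common_docs = doc_prev.intersection(doc_curr)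
--         positional_common_docs = set()
--
--         for doc in common_docs:
--             positions_prev = positional_index[prev_term][doc]
--             positions_curr = positional_index[curr_term][doc]
--
--             i = 0
--             j = 0
--             while(i<len(positions_prev) and j<len(positions_curr)):
--                 if(positions_prev[i]==positions_curr[j]-1):
--                     positional_common_docs.add(doc)
--                     break
--                 elif(positions_prev[i] > positions_curr[j]-1):
--                     j+=1
--                 else:
--                     i+=1
--
--         result = result.intersection(positional_common_docs)
--
--     return result
-- ===== SOURCE B (Python) =====
-- def _adjacent(positions_prev, positions_curr):
--     # walk the two position lists from the front, dropping the smaller head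
--     while positions_prev and positions_curr:
--         target = positions_curr[0] - 1
--         if positions_prev[0] == target:
--             return True
--         if positions_prev[0] > target:
--             positions_curr = positions_curr[1:]
--         else:
--             positions_prev = positions_prev[1:]
--     return False
--
--
-- def process_ordered_phrase_query(tokens, positional_index):
--     if any(t not in positional_index for t in tokens):
--         return set()
--
--     pairs = list(zip(tokens, tokens[1:]))
--
--     def matches(doc):
--         for prev_term, curr_term in pairs:
--             curr_docs = positional_index[curr_term]
--             if doc not in curr_docs:
--                 return False
--             if not _adjacent(positional_index[prev_term][doc], curr_docs[doc]):
--                 return False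
--         return True
--
--     return {doc for doc in positional_index[tokens[0]] if matches(doc)}
-- ===== Notes on version B (the rewrite author's own statement) =====
-- stated objective: simpler
-- what changed: A intersects per-pair document sets built with an index-cursor two-pointer scan; B does one doc-major pass: after an up-front all-terms-present test it filters the first term's documents by a fail-fast adjacency chain over consecutive term pairs, with no intermediate sets.
import Mathlib
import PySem

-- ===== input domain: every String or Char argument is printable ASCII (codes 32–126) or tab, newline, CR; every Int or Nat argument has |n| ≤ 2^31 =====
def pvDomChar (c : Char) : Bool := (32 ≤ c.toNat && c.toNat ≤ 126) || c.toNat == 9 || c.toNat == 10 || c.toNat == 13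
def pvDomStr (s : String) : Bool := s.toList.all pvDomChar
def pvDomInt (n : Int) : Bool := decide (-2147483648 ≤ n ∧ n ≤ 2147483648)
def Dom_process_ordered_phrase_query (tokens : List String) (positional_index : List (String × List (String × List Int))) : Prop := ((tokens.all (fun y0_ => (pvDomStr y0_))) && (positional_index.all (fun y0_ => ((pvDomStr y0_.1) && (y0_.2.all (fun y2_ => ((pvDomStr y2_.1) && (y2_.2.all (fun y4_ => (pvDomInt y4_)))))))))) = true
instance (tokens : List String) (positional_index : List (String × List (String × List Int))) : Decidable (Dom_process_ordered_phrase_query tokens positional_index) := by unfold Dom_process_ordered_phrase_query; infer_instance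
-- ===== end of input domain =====

-- B replaces A's per-pair document-set intersections by a single doc-major pass (one membership+adjacency
-- chain check per document of the first term) after an up-front all-terms-present test; objective: simpler.


-- shared accessor: positional_index[t] as a dict (both Pythons index the same outer dict)
def pvInner (pi : PySem.Dict String (List (String × List Int))) (t : String) : PySem.Dict String (List Int) :=
  PySem.Dict.mk ((pi.get? t).getD [])

-- ===== PORT A =====
-- the inner while loop: two cursors i, j over the position lists
-- (the extra Nat is fuel, a totality guard only: it is called with enough fuel for every step)
def pvTwoPtrA (positions_prev positions_curr : List Int) : Nat → Nat → Nat → Bool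
  | _, _, 0 => false
  | i, j, fuel + 1 =>
    if h : i < positions_prev.length ∧ j < positions_curr.length then
      if positions_prev[i] = positions_curr[j] - 1 then true
      else if positions_prev[i] > positions_curr[j] - 1 then pvTwoPtrA positions_prev positions_curr i (j+1) fuel
      else pvTwoPtrA positions_prev positions_curr (i+1) j fuel
    else false

-- the for-loop over i = 1 .. len(tokens)-1, carrying prev_term = tokens[i-1]; early 'return set()' = []
def pvLoopA (pi : PySem.Dict String (List (String × List Int))) (prev_term : String)
    (rest : List String) (result : PySem.Set String) : PySem.Set String :=
  match rest with
  | [] => result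
  | curr_term :: rest' =>
    if !(pi.contains prev_term) || !(pi.contains curr_term) then []
    else
      let doc_prev : PySem.Set String := PySem.Set.ofList (pvInner pi prev_term).keys
      let doc_curr : PySem.Set String := PySem.Set.ofList (pvInner pi curr_term).keys
      let common_docs : PySem.Set String := PySem.Set.inter doc_prev doc_curr
      let pcd : PySem.Set String := common_docs.foldl (fun acc doc =>
        if pvTwoPtrA (((pvInner pi prev_term).get? doc).getD []) (((pvInner pi curr_term).get? doc).getD []) 0 0
            ((((pvInner pi prev_term).get? doc).getD []).length + (((pvInner pi curr_term).get? doc).getD []).length)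
        then PySem.Set.add acc doc else acc) PySem.Set.empty
      pvLoopA pi curr_term rest' (PySem.Set.inter result pcd)

def process_ordered_phrase_query (tokens : List String) (positional_index : List (String × List (String × List Int))) : List String :=
  let pi := PySem.Dict.mk positional_index
  match tokens with
  | [] => []   -- tokens[0] raises IndexError in Python: excluded by Pre_
  | t0 :: rest =>
    let result : PySem.Set String :=
      if pi.contains t0 then PySem.Set.ofList (pvInner pi t0).keys else PySem.Set.empty
    pvLoopA pi t0 rest result

-- ===== PORT B =====
-- adjacency walk dropping the smaller head (B's while loop over shrinking lists;
-- the leading Nat is fuel, a totality guard only: it is called with enough fuel for every step)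
def pvAdjacentB : Nat → List Int → List Int → Bool
  | 0, _, _ => false
  | _ + 1, [], _ => false
  | _ + 1, _ :: _, [] => false
  | fuel + 1, p :: ps, c :: cs =>
    if p = c - 1 then true
    else if p > c - 1 then pvAdjacentB fuel (p :: ps) cs
    else pvAdjacentB fuel ps (c :: cs)

-- B's matches(doc): walk the consecutive-pair list, fail fast
def pvMatchesB (pi : PySem.Dict String (List (String × List Int))) (pairs : List (String × String)) (doc : String) : Bool :=
  match pairs with
  | [] => true
  | (prev_term, curr_term) :: rest =>
    let curr_docs := pvInner pi curr_term
    if !(curr_docs.contains doc) then false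
    else if !(pvAdjacentB ((((pvInner pi prev_term).get? doc).getD []).length + ((curr_docs.get? doc).getD []).length)
        (((pvInner pi prev_term).get? doc).getD []) ((curr_docs.get? doc).getD [])) then false
    else pvMatchesB pi rest doc

def process_ordered_phrase_query_alt (tokens : List String) (positional_index : List (String × List (String × List Int))) : List String :=
  let pi := PySem.Dict.mk positional_index
  if tokens.any (fun t => !(pi.contains t)) then []
  else
    match tokens with
    | [] => []   -- unreachable under Pre_: Python B raises IndexError at tokens[0]
    | t0 :: _ =>
      let pairs := tokens.zip tokens.tail
      PySem.Set.ofList ((pvInner pi t0).keys.filter (fun doc => pvMatchesB pi pairs doc))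

-- ===== PRECONDITION & SPEC =====
-- Pre_ excludes only the empty token list, on which Python A (and B) raise IndexError at tokens[0].
def Pre_process_ordered_phrase_query (tokens : List String) (positional_index : List (String × List (String × List Int))) : Prop :=
  tokens ≠ []
instance (tokens : List String) (positional_index : List (String × List (String × List Int))) : Decidable (Pre_process_ordered_phrase_query tokens positional_index) := by unfold Pre_process_ordered_phrase_query; infer_instance

def pvWitness_process_ordered_phrase_query : List String × (List (String × List (String × List Int))) :=
  (["a", "b"], [("a", [("d1", [1, 5]), ("d2", [2])]), ("b", [("d1", [2]), ("d2", [7])])])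

def Spec_process_ordered_phrase_query (tokens : List String) (positional_index : List (String × List (String × List Int))) (out : List String) : Prop := out = process_ordered_phrase_query_alt tokens positional_index
instance (tokens : List String) (positional_index : List (String × List (String × List Int))) (out : List String) : Decidable (Spec_process_ordered_phrase_query tokens positional_index out) := by unfold Spec_process_ordered_phrase_query; infer_instance

-- ===== CLAIM (what is proved, stated in full; the proofs are below) =====
def Claim_equal_process_ordered_phrase_query : Prop := ∀ (tokens : List String) (positional_index : List (String × List (String × List Int))), Dom_process_ordered_phrase_query tokens positional_index → Pre_process_ordered_phrase_query tokens positional_index → Spec_process_ordered_phrase_query tokens positional_index (process_ordered_phrase_query tokens positional_index)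

-- ===== LEMMAS AND PROOFS =====

-- the two walks agree: A's cursors (i, j) correspond to B's suffixes (drop i, drop j)
lemma pvTwoPtrA_eq_adjacentB (ps cs : List Int) :
    ∀ (f i j g : Nat),
      (ps.length - i) + (cs.length - j) ≤ f →
      (ps.length - i) + (cs.length - j) ≤ g →
      pvTwoPtrA ps cs i j f = pvAdjacentB g (ps.drop i) (cs.drop j) := by
  intro f
  induction f with
  | zero =>
    intro i j g hf _
    rw [List.drop_eq_nil_of_le (by omega)]
    cases g <;> rfl
  | succ f ihf =>
    intro i j g hf hg
    by_cases h : i < ps.length ∧ j < cs.length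
    · obtain ⟨g', rfl⟩ : ∃ g', g = g' + 1 := ⟨g - 1, by omega⟩
      rw [pvTwoPtrA, dif_pos h, List.drop_eq_getElem_cons h.1, List.drop_eq_getElem_cons h.2,
        pvAdjacentB]
      by_cases h1 : ps[i] = cs[j] - 1
      · rw [if_pos h1, if_pos h1]
      · rw [if_neg h1, if_neg h1]
        by_cases h2 : ps[i] > cs[j] - 1
        · rw [if_pos h2, if_pos h2, ← List.drop_eq_getElem_cons h.1]
          exact ihf i (j + 1) g' (by omega) (by omega)
        · rw [if_neg h2, if_neg h2, ← List.drop_eq_getElem_cons h.2]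
          exact ihf (i + 1) j g' (by omega) (by omega)
    · rw [pvTwoPtrA, dif_neg h]
      rcases Decidable.not_and_iff_or_not.mp h with h' | h'
      · rw [List.drop_eq_nil_of_le (by omega)]
        cases g <;> rfl
      · rw [show cs.drop j = [] from List.drop_eq_nil_of_le (by omega)]
        cases g <;> cases hd : ps.drop i <;> rfl

-- the form used at A's call site
lemma pvTwoPtrA_zero (ps cs : List Int) :
    pvTwoPtrA ps cs 0 0 (ps.length + cs.length) = pvAdjacentB (ps.length + cs.length) ps cs := by
  simpa using
    pvTwoPtrA_eq_adjacentB ps cs (ps.length + cs.length) 0 0 (ps.length + cs.length)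
      (by omega) (by omega)

-- membership in the conditional fold building positional_common_docs
lemma pvMem_foldl_add_if (c : String → Bool) (l acc : List String) (d : String) :
    d ∈ l.foldl (fun acc x => if c x then PySem.Set.add acc x else acc) acc ↔
      d ∈ acc ∨ (d ∈ l ∧ c d = true) := by
  induction l generalizing acc with
  | nil => simp
  | cons x xs ih =>
    simp only [List.foldl_cons, ih]
    by_cases hx : c x = true
    · simp [hx, PySem.Set.mem_add]
      constructor
      · rintro (⟨h1 | rfl⟩ | h2)
        · exact Or.inl h1
        · exact Or.inr ⟨Or.inl rfl, hx⟩
        · exact Or.inr ⟨Or.inr h2.1, h2.2⟩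
      · rintro (h1 | ⟨rfl | h2, hc⟩)
        · exact Or.inl (Or.inl h1)
        · exact Or.inl (Or.inr rfl)
        · exact Or.inr ⟨h2, hc⟩
    · rw [if_neg hx]
      constructor
      · rintro (h1 | h2)
        · exact Or.inl h1
        · exact Or.inr ⟨List.mem_cons_of_mem _ h2.1, h2.2⟩
      · rintro (h1 | ⟨hm, hc⟩)
        · exact Or.inl h1
        · rcases List.mem_cons.mp hm with rfl | hm'
          · exact absurd hc hx
          · exact Or.inr ⟨hm', hc⟩

-- set(...) commutes with filtering
lemma pvOfList_filter (p : String → Bool) (l : List String) :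
    PySem.Set.ofList (l.filter p) = (PySem.Set.ofList l).filter p := by
  induction l with
  | nil => rfl
  | cons x xs ih =>
    by_cases hx : p x = true
    · rw [List.filter_cons_of_pos hx, PySem.Set.ofList_cons, PySem.Set.ofList_cons, ih]
      show _ :: _ = List.filter p (x :: _)
      rw [List.filter_cons_of_pos hx]
      congr 1
      show List.filter _ (List.filter p _) = List.filter p (List.filter _ _)
      rw [List.filter_filter, List.filter_filter]
      apply List.filter_congr
      intro a _
      exact Bool.and_comm _ _
    · rw [List.filter_cons_of_neg hx, PySem.Set.ofList_cons, ih]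
      show _ = List.filter p (x :: _)
      rw [List.filter_cons_of_neg hx]
      show List.filter p _ = List.filter p (List.filter _ _)
      rw [List.filter_filter]
      apply List.filter_congr
      intro a _
      by_cases ha : a = x
      · subst ha
        simp [hx]
      · simp [ha]

-- one step of B's matches(doc)
lemma pvMatchesB_cons (pi : PySem.Dict String (List (String × List Int))) (p c : String)
    (rest : List (String × String)) (d : String) :
    pvMatchesB pi ((p, c) :: rest) d =
      ((pvInner pi c).contains d &&
        pvAdjacentB ((((pvInner pi p).get? d).getD []).length + (((pvInner pi c).get? d).getD []).length)
          (((pvInner pi p).get? d).getD []) (((pvInner pi c).get? d).getD []) &&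
        pvMatchesB pi rest d) := by
  show (if _ then _ else if _ then _ else _) = _
  cases h1 : (pvInner pi c).contains d <;>
    cases h2 : pvAdjacentB ((((pvInner pi p).get? d).getD []).length + (((pvInner pi c).get? d).getD []).length)
        (((pvInner pi p).get? d).getD []) (((pvInner pi c).get? d).getD []) <;>
      simp

-- A's pair loop is a filter by B's chain check, given every result element is a doc of prev_term
lemma pvLoopA_eq (pi : PySem.Dict String (List (String × List Int))) :
    ∀ (rest : List String) (prev_term : String) (result : List String),
    (∀ d ∈ result, (pvInner pi prev_term).contains d = true) →
    pvLoopA pi prev_term rest result =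
      if rest = [] then result
      else if (prev_term :: rest).any (fun t => !(pi.contains t)) then []
      else result.filter (fun d => pvMatchesB pi ((prev_term :: rest).zip rest) d) := by
  intro rest
  induction rest with
  | nil => intro prev result _; simp [pvLoopA]
  | cons curr rest' ih =>
    intro prev result hinv
    by_cases hpc : (!(pi.contains prev) || !(pi.contains curr)) = true
    · rw [pvLoopA, if_pos hpc]
      have hany : (prev :: curr :: rest').any (fun t => !(pi.contains t)) = true := by
        simp only [List.any_cons, Bool.or_eq_true] at hpc ⊢
        tauto
      simp [hany]
    · have hprev : pi.contains prev = true := by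
        rcases Bool.or_eq_false_iff.mp (Bool.eq_false_iff.mpr hpc) with ⟨h1, _⟩
        simpa using h1
      have hcurr : pi.contains curr = true := by
        rcases Bool.or_eq_false_iff.mp (Bool.eq_false_iff.mpr hpc) with ⟨_, h2⟩
        simpa using h2
      rw [pvLoopA, if_neg hpc]
      -- name the positional_common_docs set of this round
      set pcd : PySem.Set String :=
        (PySem.Set.inter (PySem.Set.ofList (pvInner pi prev).keys)
            (PySem.Set.ofList (pvInner pi curr).keys)).foldl (fun acc doc =>
          if pvTwoPtrA (((pvInner pi prev).get? doc).getD []) (((pvInner pi curr).get? doc).getD []) 0 0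
              ((((pvInner pi prev).get? doc).getD []).length + (((pvInner pi curr).get? doc).getD []).length)
          then PySem.Set.add acc doc else acc) PySem.Set.empty with hpcd
      have hpoint : ∀ d ∈ result, pcd.contains d =
          ((pvInner pi curr).contains d &&
            pvAdjacentB ((((pvInner pi prev).get? d).getD []).length + (((pvInner pi curr).get? d).getD []).length)
              (((pvInner pi prev).get? d).getD []) (((pvInner pi curr).get? d).getD [])) := by
        intro d hd
        have hdprev : d ∈ (pvInner pi prev).keys :=
          (PySem.Dict.contains_iff_mem_keys _ _).mp (hinv d hd)
        rw [Bool.eq_iff_iff]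
        rw [hpcd]
        simp only [PySem.Set.contains_iff, pvMem_foldl_add_if, PySem.Set.mem_inter,
          PySem.Set.mem_ofList, Bool.and_eq_true, pvTwoPtrA_zero, PySem.Set.empty]
        constructor
        · rintro (h | ⟨⟨_, hk⟩, hadj⟩)
          · simp at h
          · exact ⟨(PySem.Dict.contains_iff_mem_keys _ _).mpr hk, hadj⟩
        · rintro ⟨hk, hadj⟩
          exact Or.inr ⟨⟨hdprev, (PySem.Dict.contains_iff_mem_keys _ _).mp hk⟩, hadj⟩
      have hinter : PySem.Set.inter result pcd = result.filter (fun d => pcd.contains d) := rfl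
      have hfilter : PySem.Set.inter result pcd =
          result.filter (fun d =>
            (pvInner pi curr).contains d &&
            pvAdjacentB ((((pvInner pi prev).get? d).getD []).length + (((pvInner pi curr).get? d).getD []).length)
              (((pvInner pi prev).get? d).getD []) (((pvInner pi curr).get? d).getD [])) := by
        rw [hinter]
        exact List.filter_congr hpoint
      have hinv' : ∀ d ∈ PySem.Set.inter result pcd, (pvInner pi curr).contains d = true := by
        intro d hd
        rw [hfilter] at hd
        exact ((Bool.and_eq_true _ _).mp (List.mem_filter.mp hd).2).1
      rw [ih curr (PySem.Set.inter result pcd) hinv', hfilter]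
      have hany : (prev :: curr :: rest').any (fun t => !(pi.contains t)) =
          (curr :: rest').any (fun t => !(pi.contains t)) := by
        simp [hprev]
      rw [if_neg (List.cons_ne_nil _ _), hany, List.zip_cons_cons]
      cases rest' with
      | nil =>
        simp only [List.any_cons, List.any_nil, hcurr, Bool.not_true, Bool.or_false,
          if_neg (Bool.false_ne_true)]
        apply List.filter_congr
        intro d _
        rw [pvMatchesB_cons]
        simp [pvMatchesB]
      | cons t2 rest'' =>
        rw [if_neg (List.cons_ne_nil _ _)]
        by_cases hmiss : (curr :: t2 :: rest'').any (fun t => !(pi.contains t)) = true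
        · rw [if_pos hmiss, if_pos hmiss]
        · rw [if_neg hmiss, if_neg hmiss, List.filter_filter]
          apply List.filter_congr
          intro d _
          rw [pvMatchesB_cons]
          simp [Bool.and_comm]

-- ===== VERDICT (by name: the statement is the Claim_ definition above) =====
theorem process_ordered_phrase_query_spec : Claim_equal_process_ordered_phrase_query := by
  intro tokens positional_index _dom hpre
  show process_ordered_phrase_query tokens positional_index
      = process_ordered_phrase_query_alt tokens positional_index
  cases tokens with
  | nil => exact absurd rfl hpre
  | cons t0 rest =>
    simp only [process_ordered_phrase_query, process_ordered_phrase_query_alt]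
    by_cases hc : (PySem.Dict.mk positional_index).contains t0 = true
    · rw [if_pos hc]
      have hinv : ∀ d ∈ PySem.Set.ofList (pvInner (PySem.Dict.mk positional_index) t0).keys,
          (pvInner (PySem.Dict.mk positional_index) t0).contains d = true := by
        intro d hd
        rw [PySem.Set.mem_ofList] at hd
        exact (PySem.Dict.contains_iff_mem_keys _ _).mpr hd
      rw [pvLoopA_eq _ rest t0 _ hinv]
      cases rest with
      | nil =>
        simp only [List.any_cons, List.any_nil, hc, Bool.not_true, Bool.or_false]
        rw [if_neg (Bool.false_ne_true), List.zip_nil_right]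
        have : ∀ d, pvMatchesB (PySem.Dict.mk positional_index) [] d = true := fun _ => rfl
        simp [this]
      | cons t1 rest' =>
        rw [if_neg (List.cons_ne_nil _ _)]
        by_cases hmiss : ((t0 :: t1 :: rest').any fun t => !(PySem.Dict.mk positional_index).contains t) = true
        · rw [if_pos hmiss, if_pos hmiss]
        · rw [if_neg hmiss, if_neg hmiss, List.tail_cons, pvOfList_filter]
    · rw [if_neg hc]
      have hcf : (PySem.Dict.mk positional_index).contains t0 = false := Bool.eq_false_iff.mpr hc
      have hany : ((t0 :: rest).any fun t => !(PySem.Dict.mk positional_index).contains t) = true := by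
        rw [List.any_cons, hcf]
        simp
      rw [if_pos hany]
      have hinv : ∀ d ∈ (PySem.Set.empty : PySem.Set String),
          (pvInner (PySem.Dict.mk positional_index) t0).contains d = true := by
        intro d hd
        simp [PySem.Set.empty] at hd
      rw [pvLoopA_eq _ rest t0 _ hinv]
      split_ifs <;> rfl
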